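-- pv_equiv track=rewrite | github.com/Alejandro-Fernandez-Macias/coding-dojo-master | algos/arrays_to_do_one.py | skylines
-- ===== SOURCE A (Python) =====
-- def skylines(arr):
--     new_arr = []
--     building = 0
--     for i in arr:
--         if i > building and i >= 0:
--             building = i
--             new_arr.append(i)
--     return new_arr
-- ===== SOURCE B (Python) =====
-- def skylines(arr):
--     # right-to-left monotonic stack: scan backwards, keep a strictly decreasing
--     # stack of positive suffix records (popping dominated ones), then reverse it
--     stack = []
--     for x in reversed(arr):
--         if x > 0:
--             while stack and stack[-1] <= x:
--                 stack.pop()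
--             stack.append(x)
--     return stack[::-1]
-- ===== Notes on version B (the rewrite author's own statement) =====
-- stated objective: alternative
-- what changed: Replaces the forward fold that tracks a scalar running maximum with a right-to-left monotonic-stack algorithm: scan the list backwards, pop stack entries dominated by the current positive element, push it, and reverse the stack at the end.
import Mathlib
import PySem

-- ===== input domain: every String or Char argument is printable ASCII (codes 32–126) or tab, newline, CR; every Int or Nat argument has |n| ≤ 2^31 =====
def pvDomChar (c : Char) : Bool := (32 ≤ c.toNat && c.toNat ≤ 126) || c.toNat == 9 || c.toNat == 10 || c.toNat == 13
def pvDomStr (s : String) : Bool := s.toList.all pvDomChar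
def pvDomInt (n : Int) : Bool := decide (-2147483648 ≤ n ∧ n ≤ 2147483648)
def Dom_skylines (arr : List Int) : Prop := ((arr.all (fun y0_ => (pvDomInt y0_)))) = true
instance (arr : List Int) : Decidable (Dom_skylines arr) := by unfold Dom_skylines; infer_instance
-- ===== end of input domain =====

-- B replaces A's forward fold over a scalar running max with a backward monotonic-stack
-- algorithm (pop dominated suffix records, then reverse); alternative algorithm, same cost.
-- ===== PORT A =====
def skylines (arr : List Int) : List Int :=
  (arr.foldl (fun (st : List Int × Int) i =>
      if i > st.2 ∧ i ≥ 0 then (st.1 ++ [i], i) else st)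
    ([], 0)).1

-- ===== PORT B =====
-- the stack is represented top-first (Lean list head = Python stack[-1]), so the final
-- stack[::-1] is the identity on this representation and the fold result is returned as is
def popLE (x : Int) : List Int → List Int
  | [] => []
  | y :: ys => if y ≤ x then popLE x ys else y :: ys

def skylines_alt (arr : List Int) : List Int :=
  arr.reverse.foldl (fun stack x => if x > 0 then x :: popLE x stack else stack) []

-- ===== PRECONDITION & SPEC =====
def Spec_skylines (arr : List Int) (out : List Int) : Prop := out = skylines_alt arr
instance (arr : List Int) (out : List Int) : Decidable (Spec_skylines arr out) := by unfold Spec_skylines; infer_instance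

-- ===== CLAIM (what is proved, stated in full; the proofs are below) =====
def Claim_equal_skylines : Prop := ∀ (arr : List Int), Dom_skylines arr → Spec_skylines arr (skylines arr)

-- ===== LEMMAS AND PROOFS =====
-- recursive characterisation of A's kept elements: strict records above threshold b
def skGo (b : Int) : List Int → List Int
  | [] => []
  | x :: xs => if x > b then x :: skGo x xs else skGo b xs

theorem skylines_foldA (xs : List Int) : ∀ (acc : List Int) (b : Int), 0 ≤ b →
    (xs.foldl (fun (st : List Int × Int) i =>
      if i > st.2 ∧ i ≥ 0 then (st.1 ++ [i], i) else st) (acc, b)).1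
    = acc ++ skGo b xs := by
  induction xs with
  | nil => intro acc b _; simp [skGo]
  | cons x xs ih =>
    intro acc b hb
    by_cases h : x > b
    · have hx : 0 ≤ x := le_of_lt (lt_of_le_of_lt hb h)
      simp only [List.foldl_cons, skGo, if_pos h,
        if_pos (⟨h, hx⟩ : x > b ∧ x ≥ 0)]
      rw [ih (acc ++ [x]) x hx]; simp
    · have : ¬ (x > b ∧ x ≥ 0) := fun hc => h hc.1
      simp only [List.foldl_cons, skGo, if_neg h, if_neg this]
      exact ih acc b hb

theorem skGo_gt (xs : List Int) : ∀ (b y : Int), y ∈ skGo b xs → b < y := by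
  induction xs with
  | nil => intro b y h; simp [skGo] at h
  | cons x xs ih =>
    intro b y h
    by_cases hx : x > b
    · simp only [skGo, if_pos hx, List.mem_cons] at h
      rcases h with h | h
      · omega
      · exact lt_trans hx (ih x y h)
    · simp only [skGo, if_neg hx] at h
      exact ih b y h

theorem skGo_pairwise (xs : List Int) : ∀ (b : Int), List.Pairwise (· < ·) (skGo b xs) := by
  induction xs with
  | nil => intro b; simp [skGo]
  | cons x xs ih =>
    intro b
    by_cases hx : x > b
    · simp only [skGo, if_pos hx]
      exact List.pairwise_cons.mpr ⟨fun y hy => skGo_gt xs x y hy, ih x⟩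
    · simpa [skGo, hx] using ih b

theorem skGo_mono (xs : List Int) : ∀ (s t : Int), s ≤ t →
    skGo t xs = (skGo s xs).filter (fun y => decide (t < y)) := by
  induction xs with
  | nil => intro s t _; simp [skGo]
  | cons x xs ih =>
    intro s t hst
    by_cases ht : x > t
    · have hs : x > s := lt_of_le_of_lt hst ht
      simp only [skGo, if_pos ht, if_pos hs, List.filter_cons,
        decide_eq_true_eq, if_pos ht]
      congr 1
      exact (List.filter_eq_self.mpr
        (fun y hy => decide_eq_true (lt_trans ht (skGo_gt xs x y hy)))).symm
    · by_cases hs : x > s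
      · simp only [skGo, if_neg ht, if_pos hs, List.filter_cons,
          decide_eq_true_eq, if_neg ht]
        exact ih x t (by omega)
      · simp only [skGo, if_neg ht, if_neg hs]
        exact ih s t hst

theorem popLE_filter (l : List Int) : ∀ (x : Int), List.Pairwise (· < ·) l →
    popLE x l = l.filter (fun y => decide (x < y)) := by
  induction l with
  | nil => intro x _; simp [popLE]
  | cons y ys ih =>
    intro x hp
    rcases List.pairwise_cons.mp hp with ⟨hall, htail⟩
    by_cases h : y ≤ x
    · simp only [popLE, if_pos h, List.filter_cons, decide_eq_true_eq,
        if_neg (by omega : ¬ x < y)]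
      exact ih x htail
    · simp only [popLE, if_neg h, List.filter_cons, decide_eq_true_eq,
        if_pos (by omega : x < y)]
      congr 1
      exact (List.filter_eq_self.mpr
        (fun z hz => decide_eq_true (by have := hall z hz; omega))).symm

theorem skylines_foldB (xs : List Int) :
    xs.foldr (fun x stack => if x > 0 then x :: popLE x stack else stack) [] = skGo 0 xs := by
  induction xs with
  | nil => simp [skGo]
  | cons x xs ih =>
    by_cases h : x > 0
    · simp only [List.foldr_cons, skGo, if_pos h, ih]
      congr 1
      rw [popLE_filter _ x (skGo_pairwise xs 0), ← skGo_mono xs 0 x (le_of_lt h)]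
    · simp only [List.foldr_cons, skGo, if_neg h, ih]

-- ===== VERDICT (by name: the statement is the Claim_ definition above) =====
theorem skylines_spec : Claim_equal_skylines := by
  intro arr _
  unfold Spec_skylines skylines skylines_alt
  rw [skylines_foldA arr [] 0 le_rfl, List.foldl_reverse, skylines_foldB arr]
  simp
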